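-- pv_equiv track=rewrite | github.com/theablemo/DistilKaggle | 5/utility/3_cell_metrics_generator.py | header3_counter
-- ===== SOURCE A (Python) =====
-- def header3_counter(text):
--     count = 0
--     if text[0:4] =='### ':
--         count += 1
--     for i in range(len(text)-3):
--         if text[i:i+5] ==' ### ' or text[i:i+5] == '\n### ':
--             count +=1
--     return count
-- ===== SOURCE B (Python) =====
-- def header3_counter(text):
--     # Split on the marker: each boundary between adjacent parts is one
--     # occurrence of '### '; it is a header iff it is at the very start
--     # (left part empty at index 0), right after another marker (left part
--     # empty later, since the marker ends with a space), or after ' '/'\n'.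
--     parts = text.split('### ')
--     count = 0
--     for part in parts[:-1]:
--         if part == '' or part[-1] in ' \n':
--             count += 1
--     return count
-- ===== Notes on version B (the rewrite author's own statement) =====
-- stated objective: alternative
-- what changed: Instead of A's scan that compares a fresh 4- or 5-character slice at every index, B splits the text on the marker '### ' once and counts the separator boundaries whose left part is empty (start of text or right after another marker, which ends in a space) or ends in ' ' or '\n'.
import Mathlib
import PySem

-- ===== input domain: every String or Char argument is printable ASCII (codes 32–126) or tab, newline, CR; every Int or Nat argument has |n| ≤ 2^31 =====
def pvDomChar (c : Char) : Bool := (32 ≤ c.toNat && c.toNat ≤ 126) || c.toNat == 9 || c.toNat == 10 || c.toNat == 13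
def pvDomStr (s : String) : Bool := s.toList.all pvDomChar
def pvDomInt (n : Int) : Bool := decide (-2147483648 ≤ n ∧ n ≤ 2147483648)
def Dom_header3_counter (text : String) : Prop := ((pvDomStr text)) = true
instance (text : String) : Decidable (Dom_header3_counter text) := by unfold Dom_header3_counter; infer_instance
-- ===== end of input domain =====

-- B replaces A's per-index slice scan by a single split on '### ' followed by a count
-- of the qualifying split boundaries (objective: alternative).

-- ===== PORT A =====
def header3_counter (text : String) : Int :=
  let cs := text.toList
  let count : Int := 0
  let count := if PySem.List.slice cs (some 0) (some 4) = ['#', '#', '#', ' '] then count + 1 else count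
  (PySem.List.pyRange 0 (PySem.Str.len text - 3) 1).foldl
    (fun count i =>
      if PySem.List.slice cs (some i) (some (i + 5)) = [' ', '#', '#', '#', ' '] ∨
         PySem.List.slice cs (some i) (some (i + 5)) = ['\n', '#', '#', '#', ' ']
      then count + 1 else count) count

-- ===== PORT B =====
-- parts = text.split('### '); for part in parts[:-1]: if part == '' or part[-1] in ' \n': count += 1
def header3_counter_alt (text : String) : Int :=
  (PySem.List.slice (PySem.Chars.splitOn text.toList ['#', '#', '#', ' ']) none (some (-1))).foldl
    (fun count part =>
      if part = [] ∨ PySem.List.pyGet? part (-1) = some ' ' ∨ PySem.List.pyGet? part (-1) = some '\n'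
      then count + 1 else count) 0

-- ===== PRECONDITION & SPEC =====
def Spec_header3_counter (text : String) (out : Int) : Prop := out = header3_counter_alt text
instance (text : String) (out : Int) : Decidable (Spec_header3_counter text out) := by unfold Spec_header3_counter; infer_instance

-- ===== CLAIM (what is proved, stated in full; the proofs are below) =====
def Claim_equal_header3_counter : Prop := ∀ (text : String), Dom_header3_counter text → Spec_header3_counter text (header3_counter text)

-- ===== LEMMAS AND PROOFS =====

-- the separator A looks for
def pvSep : List Char := ['#', '#', '#', ' ']

-- B's per-part test, as the Bool countP predicate
def pvQ (p : List Char) : Bool :=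
  decide (p = [] ∨ PySem.List.pyGet? p (-1) = some ' ' ∨ PySem.List.pyGet? p (-1) = some '\n')

-- number of loop hits of A, expressed as a countP over Nat indices
def pvHits (cs : List Char) : Nat :=
  (List.range (cs.length - 3)).countP fun i =>
    decide ((cs.drop i).take 5 = [' ', '#', '#', '#', ' '] ∨
            (cs.drop i).take 5 = ['\n', '#', '#', '#', ' '])

theorem pvHits_nil : pvHits [] = 0 := by decide

theorem pvHits_cons (c : Char) (cs : List Char) :
    (pvHits (c :: cs) : Int) =
      (if (c = ' ' ∨ c = '\n') ∧ cs.take 4 = ['#', '#', '#', ' '] then 1 else 0) + pvHits cs := by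
  by_cases h : 3 ≤ cs.length
  · have hlen : (c :: cs).length - 3 = (cs.length - 3) + 1 := by simp; omega
    rw [pvHits, hlen, List.range_succ_eq_map]
    rw [List.countP_cons, List.countP_map]
    have hdropshift : ∀ i : Nat, (c :: cs).drop (i + 1) = cs.drop i := by intro i; simp
    have hQ : (fun i => decide (((c :: cs).drop (i + 1)).take 5 = [' ', '#', '#', '#', ' '] ∨
                ((c :: cs).drop (i + 1)).take 5 = ['\n', '#', '#', '#', ' ']))
            = (fun i => decide ((cs.drop i).take 5 = [' ', '#', '#', '#', ' '] ∨
                (cs.drop i).take 5 = ['\n', '#', '#', '#', ' '])) := by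
      funext i; rw [hdropshift]
    have h0 : ((c :: cs).drop 0).take 5 = c :: cs.take 4 := by simp [List.take_succ_cons]
    rw [pvHits]
    simp only [Function.comp_def, hQ, h0]
    have hcond : ((c :: cs.take 4 = [' ', '#', '#', '#', ' '] ∨
                   c :: cs.take 4 = ['\n', '#', '#', '#', ' ']))
               ↔ ((c = ' ' ∨ c = '\n') ∧ cs.take 4 = ['#', '#', '#', ' ']) := by
      constructor
      · rintro (h1 | h1) <;> simp_all
      · rintro ⟨hc | hc, ht⟩ <;> simp_all
    by_cases hc : (c = ' ' ∨ c = '\n') ∧ cs.take 4 = ['#', '#', '#', ' ']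
    · rw [if_pos hc]
      have : decide (c :: cs.take 4 = [' ', '#', '#', '#', ' '] ∨
              c :: cs.take 4 = ['\n', '#', '#', '#', ' ']) = true := by
        simp only [decide_eq_true_iff]; exact hcond.mpr hc
      rw [this]; simp; ring
    · rw [if_neg hc]
      have : decide (c :: cs.take 4 = [' ', '#', '#', '#', ' '] ∨
              c :: cs.take 4 = ['\n', '#', '#', '#', ' ']) = false := by
        simp only [decide_eq_false_iff_not]; intro hx; exact hc (hcond.mp hx)
      rw [this]; simp
  · -- too short: both sides are (0 or the single false test) = 0
    have hL1 : pvHits (c :: cs) = 0 := by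
      rcases cs with _ | ⟨a, _ | ⟨b, _ | _⟩⟩ <;> simp_all [pvHits]
    have hL2 : pvHits cs = 0 := by
      have : cs.length - 3 = 0 := by omega
      simp [pvHits, this]
    have hT : ¬ ((c = ' ' ∨ c = '\n') ∧ cs.take 4 = ['#', '#', '#', ' ']) := by
      rintro ⟨-, ht⟩
      have := congrArg List.length ht
      simp at this; omega
    rw [hL1, hL2, if_neg hT]; simp

-- A's fold equals pvHits
theorem pvFold_eq (cs : List Char) (init : Int) :
    (PySem.List.pyRange 0 ((cs.length : Int) - 3) 1).foldl
      (fun count i =>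
        if PySem.List.slice cs (some i) (some (i + 5)) = [' ', '#', '#', '#', ' '] ∨
           PySem.List.slice cs (some i) (some (i + 5)) = ['\n', '#', '#', '#', ' ']
        then count + 1 else count) init = init + (pvHits cs : Int) := by
  rw [PySem.List.pyRange_one, List.foldl_map]
  have hsl : ∀ k : Nat, PySem.List.slice cs (some ((0 : Int) + k)) (some ((0 : Int) + k + 5))
      = (cs.drop k).take 5 := by
    intro k
    rw [PySem.List.slice_toNat cs (by omega) (by omega)]
    congr 1
    · omega
    · congr 1; omega
  have hfun : (fun (count : Int) (k : Nat) =>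
      if PySem.List.slice cs (some ((0:Int) + k)) (some ((0:Int) + k + 5)) = [' ', '#', '#', '#', ' '] ∨
         PySem.List.slice cs (some ((0:Int) + k)) (some ((0:Int) + k + 5)) = ['\n', '#', '#', '#', ' ']
      then count + 1 else count)
    = (fun (count : Int) (k : Nat) =>
      if (fun k => decide ((cs.drop k).take 5 = [' ', '#', '#', '#', ' '] ∨
            (cs.drop k).take 5 = ['\n', '#', '#', '#', ' '])) k = true
      then count + 1 else count) := by
    funext count k
    rw [hsl k]
    simp
  rw [hfun, PySem.List.foldl_count_if]
  have : ((cs.length : Int) - 3 - 0).toNat = cs.length - 3 := by omega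
  rw [this]
  rfl

-- reference splitter: the simple recursion str.split('### ') implements
def pvSplit (l : List Char) : List (List Char) :=
  if h : pvSep <+: l then
    [] :: pvSplit (l.drop 4)
  else
    match l with
    | [] => [[]]
    | c :: rest => (pvSplit rest).modifyHead (c :: ·)
termination_by l.length
decreasing_by
  · have h4 : pvSep.length ≤ l.length := h.length_le
    simp [pvSep] at h4
    simp
    omega
  · simp

theorem pvSplit_prefix {l : List Char} (h : pvSep <+: l) :
    pvSplit l = [] :: pvSplit (l.drop 4) := by
  rw [pvSplit.eq_def, dif_pos h]

theorem pvSplit_nil : pvSplit [] = [[]] := by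
  rw [pvSplit.eq_def, dif_neg (by simp [pvSep])]

theorem pvSplit_cons {c : Char} {rest : List Char} (h : ¬ pvSep <+: (c :: rest)) :
    pvSplit (c :: rest) = (pvSplit rest).modifyHead (c :: ·) := by
  rw [pvSplit.eq_def, dif_neg h]

theorem pvSplit_ne_nil (l : List Char) : pvSplit l ≠ [] := by
  induction l using pvSplit.induct with
  | case1 l h ih => rw [pvSplit_prefix h]; simp
  | case2 h => rw [pvSplit_nil]; simp
  | case3 c rest h ih =>
    rw [pvSplit_cons h]
    cases hp : pvSplit rest with
    | nil => exact absurd hp ih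
    | cons p ps => simp [List.modifyHead]

-- splitOn.go unwinds to pvSplit
theorem pvGo (fuel : Nat) : ∀ (l cur : List Char) (acc : List (List Char)), l.length < fuel →
    PySem.Chars.splitOn.go pvSep fuel l cur acc
      = acc.reverse ++ (pvSplit l).modifyHead (fun t => cur.reverse ++ t) := by
  induction fuel with
  | zero => intro l cur acc h; omega
  | succ f ih =>
    intro l cur acc h
    cases l with
    | nil =>
      rw [pvSplit_nil]
      simp [PySem.Chars.splitOn.go, List.modifyHead]
    | cons c rest =>
      by_cases hp : pvSep <+: (c :: rest)
      · have hpb : pvSep.isPrefixOf (c :: rest) = true := List.isPrefixOf_iff_prefix.mpr hp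
        have hstep : PySem.Chars.splitOn.go pvSep (f + 1) (c :: rest) cur acc
            = PySem.Chars.splitOn.go pvSep f ((c :: rest).drop pvSep.length) [] (cur.reverse :: acc) := by
          simp [PySem.Chars.splitOn.go, hpb]
        have hlen : ((c :: rest).drop pvSep.length).length < f := by
          simp [pvSep] at h ⊢
          omega
        rw [hstep, ih _ _ _ hlen, pvSplit_prefix hp]
        have hdrop : (c :: rest).drop pvSep.length = (c :: rest).drop 4 := by
          simp [pvSep]
        rw [hdrop]
        cases hq : pvSplit ((c :: rest).drop 4) with
        | nil => exact absurd hq (pvSplit_ne_nil _)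
        | cons p ps => simp [List.modifyHead]
      · have hpb : pvSep.isPrefixOf (c :: rest) = false := by
          rw [← Bool.not_eq_true, List.isPrefixOf_iff_prefix]; exact hp
        have hstep : PySem.Chars.splitOn.go pvSep (f + 1) (c :: rest) cur acc
            = PySem.Chars.splitOn.go pvSep f rest (c :: cur) acc := by
          simp [PySem.Chars.splitOn.go, hpb]
        have hlen : rest.length < f := by simp at h; omega
        rw [hstep, ih _ _ _ hlen, pvSplit_cons hp]
        cases hq : pvSplit rest with
        | nil => exact absurd hq (pvSplit_ne_nil _)
        | cons p ps => simp [List.modifyHead]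

theorem pvSplitOn_eq (l : List Char) : PySem.Chars.splitOn l pvSep = pvSplit l := by
  rw [PySem.Chars.splitOn, pvGo (l.length + 1) l [] [] (by omega)]
  cases hq : pvSplit l with
  | nil => exact absurd hq (pvSplit_ne_nil _)
  | cons p ps => simp [List.modifyHead]

-- in the cons-no-prefix case the head of pvSplit is nonempty once a later part exists
theorem pvSplit_head_ne_nil {rest : List Char} (h : ¬ pvSep <+: rest)
    {p0 : List Char} {ps : List (List Char)} (he : pvSplit rest = p0 :: ps) (hps : ps ≠ []) :
    p0 ≠ [] := by
  cases rest with
  | nil =>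
    rw [pvSplit_nil] at he
    cases he; simp_all
  | cons c' r' =>
    rw [pvSplit_cons h] at he
    cases hq : pvSplit r' with
    | nil => exact absurd hq (pvSplit_ne_nil _)
    | cons u us =>
      rw [hq] at he
      simp [List.modifyHead] at he
      simp [← he.1]

-- pvQ computations
theorem pvQ_nil : pvQ [] = true := by decide

theorem pvQ_singleton (c : Char) : pvQ [c] = decide (c = ' ' ∨ c = '\n') := by
  simp [pvQ, PySem.List.pyGet?_neg_one]

theorem pvQ_cons (c : Char) {p : List Char} (hp : p ≠ []) : pvQ (c :: p) = pvQ p := by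
  obtain ⟨x, xs, rfl⟩ := List.exists_cons_of_ne_nil hp
  simp [pvQ, PySem.List.pyGet?_neg_one, List.getLast?_cons_cons]

-- a '#' head never produces a loop hit
theorem pvHits_hash (r : List Char) : (pvHits ('#' :: r) : Int) = pvHits r := by
  rw [pvHits_cons]; simp

-- take-4 test is the prefix test
theorem pvTake4_iff (t : List Char) : t.take 4 = ['#', '#', '#', ' '] ↔ pvSep <+: t := by
  rw [List.prefix_iff_eq_take, show pvSep.length = 4 from rfl, pvSep, eq_comm]

-- the key bridge: B's count over the parts equals A's prefix-hit + loop-hit count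
theorem pvSplit_count (l : List Char) :
    (((pvSplit l).dropLast.countP pvQ : Nat) : Int)
      = (if pvSep <+: l then 1 else 0) + (pvHits l : Int) := by
  induction l using pvSplit.induct with
  | case1 l h ih =>
    obtain ⟨t, ht⟩ := h
    have hl : l = '#' :: '#' :: '#' :: ' ' :: t := by rw [← ht]; rfl
    subst hl
    have hdrop : ('#' :: '#' :: '#' :: ' ' :: t).drop 4 = t := rfl
    rw [hdrop] at ih
    rw [pvSplit_prefix ⟨t, ht⟩, hdrop]
    cases hq : pvSplit t with
    | nil => exact absurd hq (pvSplit_ne_nil _)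
    | cons p ps =>
      rw [hq] at ih
      rw [List.dropLast_cons_of_ne_nil (by simp : (p :: ps) ≠ ([] : List (List Char)))]
      rw [List.countP_cons, pvQ_nil]
      have hpref : pvSep <+: '#' :: '#' :: '#' :: ' ' :: t := ⟨t, ht⟩
      rw [if_pos hpref]
      have hh : (pvHits ('#' :: '#' :: '#' :: ' ' :: t) : Int)
          = (if pvSep <+: t then 1 else 0) + (pvHits t : Int) := by
        rw [pvHits_hash, pvHits_hash, pvHits_hash, pvHits_cons]
        have heq : ((' ' = ' ' ∨ ' ' = '\n') ∧ t.take 4 = ['#', '#', '#', ' ']) ↔ pvSep <+: t := by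
          rw [pvTake4_iff]; simp
        by_cases hct : pvSep <+: t
        · rw [if_pos (heq.mpr hct), if_pos hct]
        · rw [if_neg (fun hx => hct (heq.mp hx)), if_neg hct]
      rw [hh, if_pos rfl]
      by_cases hct : pvSep <+: t
      · rw [if_pos hct] at ih ⊢
        push_cast at ih ⊢
        omega
      · rw [if_neg hct] at ih ⊢
        push_cast at ih ⊢
        omega
  | case2 h =>
    rw [pvSplit_nil]
    simp [pvHits_nil, h]
  | case3 c rest h ih =>
    rw [pvSplit_cons h, if_neg h, pvHits_cons]
    have hnp : ¬ pvSep <+: rest → ¬ ((c = ' ' ∨ c = '\n') ∧ rest.take 4 = ['#', '#', '#', ' ']) := by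
      intro hr hx; exact hr ((pvTake4_iff rest).mp hx.2)
    cases hq : pvSplit rest with
    | nil => exact absurd hq (pvSplit_ne_nil _)
    | cons p0 ps =>
      rw [hq] at ih
      by_cases hps : ps = ([] : List (List Char))
      · subst hps
        rw [show ([p0] : List (List Char)).dropLast = [] from rfl, List.countP_nil] at ih
        rw [show (List.modifyHead (fun t => c :: t) [p0]) = [c :: p0] from rfl]
        rw [show ([c :: p0] : List (List Char)).dropLast = [] from rfl, List.countP_nil]
        have hpre : ¬ pvSep <+: rest := by
          intro hx
          rw [if_pos hx] at ih
          push_cast at ih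
          omega
        rw [if_neg (hnp hpre)]
        rw [if_neg hpre] at ih
        push_cast at ih ⊢
        omega
      · rw [show (List.modifyHead (fun t => c :: t) (p0 :: ps)) = (c :: p0) :: ps from rfl]
        rw [List.dropLast_cons_of_ne_nil hps, List.countP_cons]
        rw [List.dropLast_cons_of_ne_nil hps, List.countP_cons] at ih
        by_cases hpre : pvSep <+: rest
        · have hcc : ([] : List Char) :: pvSplit (rest.drop 4) = p0 :: ps := by
            rw [← pvSplit_prefix hpre]; exact hq
          have hp0 : p0 = [] := (List.cons_eq_cons.mp hcc).1.symm
          subst hp0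
          rw [pvQ_nil, if_pos rfl] at ih
          rw [if_pos hpre] at ih
          rw [pvQ_singleton]
          have ht4 : rest.take 4 = ['#', '#', '#', ' '] := (pvTake4_iff rest).mpr hpre
          simp only [decide_eq_true_eq]
          by_cases hc : c = ' ' ∨ c = '\n'
          · rw [if_pos hc, if_pos ⟨hc, ht4⟩]
            push_cast at ih ⊢
            omega
          · rw [if_neg hc, if_neg (fun hx => hc hx.1)]
            push_cast at ih ⊢
            omega
        · have hp0 : p0 ≠ [] := pvSplit_head_ne_nil hpre hq hps
          rw [pvQ_cons c hp0]
          rw [if_neg hpre] at ih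
          rw [if_neg (hnp hpre)]
          cases hqp : pvQ p0 <;> simp [hqp] at ih ⊢ <;> omega

-- ===== VERDICT (by name: the statement is the Claim_ definition above) =====
theorem header3_counter_spec : Claim_equal_header3_counter := by
  intro text _
  show header3_counter text = header3_counter_alt text
  unfold header3_counter header3_counter_alt
  have hlen : PySem.Str.len text = (text.toList.length : Int) := by
    simp [PySem.Str.len_eq]
  rw [hlen, pvFold_eq]
  have hsl0 : PySem.List.slice text.toList (some 0) (some 4) = text.toList.take 4 := by
    rw [PySem.List.slice_toNat text.toList (by omega) (by omega)]; simp
  rw [hsl0]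
  rw [PySem.List.slice_to_neg_one, PySem.List.foldl_ite_add_one]
  rw [show PySem.Chars.splitOn text.toList ['#', '#', '#', ' '] = PySem.Chars.splitOn text.toList pvSep from rfl]
  rw [pvSplitOn_eq]
  have hc : (List.countP (fun part => decide (part = [] ∨
        PySem.List.pyGet? part (-1) = some ' ' ∨ PySem.List.pyGet? part (-1) = some '\n'))
      (pvSplit text.toList).dropLast) = (pvSplit text.toList).dropLast.countP pvQ := rfl
  rw [hc, pvSplit_count]
  by_cases h : text.toList.take 4 = ['#', '#', '#', ' ']
  · rw [if_pos h, if_pos ((pvTake4_iff _).mp h)]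
    ring
  · rw [if_neg h, if_neg (fun hx => h ((pvTake4_iff _).mpr hx))]
    ring
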